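-- pv_equiv track=rewrite | github.com/ppercent/Picture-Encoder | src/utils/generateImage.py | dec_string
-- ===== SOURCE A (Python) =====
-- def dec_string(text): #nums to encoded nums
--     res=''
--     incrementNum=0
--
--     listed_dec_char=list(str(text))
--     while '0' in listed_dec_char:
--         incrementNum+=1
--         for digit in range(len(listed_dec_char)):
--             listed_dec_char[digit]=str((int(listed_dec_char[digit])+1)%10)
--     dec_char = ''.join(listed_dec_char)
--     if incrementNum==0:
--         incrementNum=9
--     res=res+str(len(dec_char))+str(incrementNum)+dec_char
--     return res
-- ===== SOURCE B (Python) =====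
-- def dec_string(text):  # nums to encoded nums
--     s = str(text)
--     if '0' not in s:
--         return str(len(s)) + '9' + s
--     needed = {(10 - int(c)) % 10 for c in s}
--     k = next(i for i in range(10) if i not in needed)
--     encoded = ''.join(str((int(c) + k) % 10) for c in s)
--     return str(len(encoded)) + str(k) + encoded
-- ===== Notes on version B (the rewrite author's own statement) =====
-- stated objective: faster
-- what changed: A repeatedly shifts every digit by 1 in a while-loop until no '0' remains; B computes the shift amount k directly (the first residue in 0..9 not killed by any digit, via a one-pass set of forbidden residues) and encodes in a single pass.
import Mathlib
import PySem

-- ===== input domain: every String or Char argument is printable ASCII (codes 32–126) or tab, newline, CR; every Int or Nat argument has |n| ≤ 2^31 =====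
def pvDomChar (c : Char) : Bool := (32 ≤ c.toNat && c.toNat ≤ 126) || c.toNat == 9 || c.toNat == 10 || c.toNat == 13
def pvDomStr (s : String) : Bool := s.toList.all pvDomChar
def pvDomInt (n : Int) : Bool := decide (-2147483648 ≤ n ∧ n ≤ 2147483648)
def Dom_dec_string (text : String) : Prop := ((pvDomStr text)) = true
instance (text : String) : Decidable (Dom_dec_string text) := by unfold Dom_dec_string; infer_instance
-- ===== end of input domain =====

-- B replaces A's repeated shift-every-digit-by-1 while-loop by a direct one-pass
-- computation of the shift amount (simpler, one encoding pass instead of up to ten).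

-- ===== PORT A =====
-- int(ch) for a single character: exact on digit chars '0'..'9'; on any other char
-- Python raises ValueError, and Pre_ guarantees int() is only reached on digits.
def cInt (c : Char) : Int := (c.toNat : Int) - 48
-- str(d) for a single digit value d ∈ [0, 10): the one digit character.
def dChar (n : Int) : Char :=
  if n = 0 then '0' else if n = 1 then '1' else if n = 2 then '2' else if n = 3 then '3'
  else if n = 4 then '4' else if n = 5 then '5' else if n = 6 then '6' else if n = 7 then '7'
  else if n = 8 then '8' else '9'
-- the body of A's for-loop: listed[digit] = str((int(listed[digit]) + 1) % 10);
-- % 10 with positive literal modulus: Python's % coincides with Int.emod here.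
def stepC (c : Char) : Char := dChar ((cInt c + 1) % 10)
-- A's while-loop. The shifts cycle with period 10, so whenever the Python loop
-- terminates it does so within 10 iterations; fuel 10 is never exhausted under Pre_.
def decLoopA : Nat → List Char → Int → List Char × Int
  | 0, l, inc => (l, inc)
  | n + 1, l, inc => if '0' ∈ l then decLoopA n (l.map stepC) (inc + 1) else (l, inc)

def dec_string (text : String) : String :=
  let listed := text.toList          -- list(str(text))
  let p := decLoopA 10 listed 0
  let dec_char := String.ofList p.1      -- ''.join(...)
  let incrementNum := if p.2 = 0 then (9 : Int) else p.2
  PySem.Int.toStr ((p.1.length : Int)) ++ PySem.Int.toStr incrementNum ++ dec_char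

-- ===== PORT B =====
def dec_string_alt (text : String) : String :=
  let s := text.toList
  if '0' ∈ s then
    -- needed = {(10 - int(c)) % 10 for c in s}
    let needed : PySem.Set Int := PySem.Set.ofList (s.map (fun c => (10 - cInt c) % 10))
    -- k = next(i for i in range(10) if i not in needed); Pre_ guarantees the generator
    -- is nonempty (Python raises StopIteration otherwise), so getD 0 is never used.
    let k := ((PySem.List.pyRange 0 10 1).find? (fun i => !(PySem.Set.contains needed i))).getD 0
    -- encoded = ''.join(str((int(c) + k) % 10) for c in s)
    let encoded := s.map (fun c => dChar ((cInt c + k) % 10))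
    PySem.Int.toStr ((encoded.length : Int)) ++ PySem.Int.toStr k ++ String.ofList encoded
  else
    PySem.Int.toStr ((s.length : Int)) ++ "9" ++ text

-- ===== PRECONDITION & SPEC =====
-- Pre_ excludes exactly the inputs where A produces no value: if '0' occurs, a non-digit
-- character makes A raise ValueError, and a string containing all of '1'..'9' (plus '0')
-- makes A's while-loop run forever.
def Pre_dec_string (text : String) : Prop :=
  '0' ∈ text.toList →
    ((text.toList.all Char.isDigit) = true ∧
     (['1','2','3','4','5','6','7','8','9'].any (fun c => !(text.toList.contains c))) = true)
instance (text : String) : Decidable (Pre_dec_string text) := by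
  unfold Pre_dec_string; infer_instance
def pvWitness_dec_string : String := "102"
def Spec_dec_string (text : String) (out : String) : Prop := out = dec_string_alt text
instance (text : String) (out : String) : Decidable (Spec_dec_string text out) := by unfold Spec_dec_string; infer_instance

-- ===== CLAIM (what is proved, stated in full; the proofs are below) =====
def Claim_equal_dec_string : Prop := ∀ (text : String), Dom_dec_string text → Pre_dec_string text → Spec_dec_string text (dec_string text)

-- ===== LEMMAS AND PROOFS =====

lemma digit_cases (c : Char) (h : c.isDigit) :
    c = '0' ∨ c = '1' ∨ c = '2' ∨ c = '3' ∨ c = '4' ∨ c = '5' ∨ c = '6' ∨ c = '7' ∨ c = '8' ∨ c = '9' := by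
  have h' : 48 ≤ c.toNat ∧ c.toNat ≤ 57 := by simpa [Char.isDigit] using h
  have hr : c.toNat = 48 ∨ c.toNat = 49 ∨ c.toNat = 50 ∨ c.toNat = 51 ∨ c.toNat = 52 ∨
      c.toNat = 53 ∨ c.toNat = 54 ∨ c.toNat = 55 ∨ c.toNat = 56 ∨ c.toNat = 57 := by omega
  rcases hr with h1|h1|h1|h1|h1|h1|h1|h1|h1|h1 <;> rw [← Char.ofNat_toNat c, h1] <;> decide

lemma cInt_bounds (c : Char) (h : c.isDigit) : 0 ≤ cInt c ∧ cInt c < 10 := by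
  rcases digit_cases c h with h|h|h|h|h|h|h|h|h|h <;> subst h <;> decide

lemma dChar_cInt (c : Char) (h : c.isDigit) : dChar (cInt c) = c := by
  rcases digit_cases c h with h|h|h|h|h|h|h|h|h|h <;> subst h <;> decide

lemma cInt_dChar (m : Int) (h0 : 0 ≤ m) (h1 : m < 10) : cInt (dChar m) = m := by
  interval_cases m <;> decide

lemma dChar_eq_zero (m : Int) (h0 : 0 ≤ m) (h1 : m < 10) : dChar m = '0' ↔ m = 0 := by
  interval_cases m <;> simp [dChar]

-- iterating A's shift j times on an all-digit list shifts every digit by j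
lemma iter_map (l : List Char) (hd : ∀ c ∈ l, c.isDigit) (j : Nat) :
    (fun t => t.map stepC)^[j] l = l.map (fun c => dChar ((cInt c + (j : Int)) % 10)) := by
  induction j with
  | zero =>
      simp only [Function.iterate_zero, id]
      conv_lhs => rw [← List.map_id l]
      refine List.map_congr_left ?_
      intro c hc
      have hb := cInt_bounds c (hd c hc)
      have h1 : ((0 : Nat) : Int) = 0 := rfl
      rw [id, h1]
      have : (cInt c + (0 : Int)) % 10 = cInt c := by omega
      rw [this, dChar_cInt c (hd c hc)]
  | succ n ih =>
      rw [Function.iterate_succ_apply', ih, List.map_map]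
      refine List.map_congr_left ?_
      intro c hc
      have hb := cInt_bounds c (hd c hc)
      simp only [Function.comp, stepC]
      rw [cInt_dChar _ (by omega) (by omega)]
      congr 1
      push_cast
      omega

-- A's while-loop stops at the least j with no '0' present, and counts it
lemma decLoopA_eq (fuel : Nat) :
    ∀ (j : Nat) (l : List Char) (inc : Int), j < fuel →
      '0' ∉ (fun t => t.map stepC)^[j] l →
      (∀ i < j, '0' ∈ (fun t => t.map stepC)^[i] l) →
      decLoopA fuel l inc = ((fun t => t.map stepC)^[j] l, inc + (j : Int)) := by
  induction fuel with
  | zero => intro j l inc hj; omega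
  | succ n ih =>
      intro j l inc hj hstop hmin
      match j with
      | 0 =>
          simp only [Function.iterate_zero, id] at hstop ⊢
          simp [decLoopA, hstop]
      | j' + 1 =>
          have h0 : '0' ∈ l := by simpa using hmin 0 (by omega)
          simp only [decLoopA, if_pos h0]
          rw [ih j' (l.map stepC) (inc + 1) (by omega)
              (by rw [← Function.iterate_succ_apply]; exact hstop)
              (by intro i hi
                  rw [← Function.iterate_succ_apply]
                  exact hmin (i + 1) (by omega))]
          simp only [Prod.mk.injEq]
          exact ⟨(Function.iterate_succ_apply _ _ _).symm, by push_cast; ring⟩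

lemma zero_mem_iter (l : List Char) (hd : ∀ c ∈ l, c.isDigit) (j : Nat) :
    '0' ∈ (fun t => t.map stepC)^[j] l ↔ ∃ c ∈ l, (cInt c + (j : Int)) % 10 = 0 := by
  rw [iter_map l hd j]
  simp only [List.mem_map]
  constructor
  · rintro ⟨c, hc, he⟩
    have hb := cInt_bounds c (hd c hc)
    exact ⟨c, hc, by rwa [dChar_eq_zero _ (by omega) (by omega)] at he⟩
  · rintro ⟨c, hc, he⟩
    have hb := cInt_bounds c (hd c hc)
    exact ⟨c, hc, by rwa [dChar_eq_zero _ (by omega) (by omega)]⟩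

-- find? over range(a, b) returns the least element satisfying p
lemma find_least_range (p : Int → Bool) (b : Int) :
    ∀ (n : Nat) (a j : Int), (b - a).toNat = n → a ≤ j → j < b → p j = true →
      (∀ i, a ≤ i → i < j → p i = false) →
      (PySem.List.pyRange a b 1).find? p = some j := by
  intro n
  induction n with
  | zero => intro a j h ha hj _ _; omega
  | succ n ih =>
      intro a j h ha hj hpj hmin
      rw [PySem.List.pyRange_one_cons (by omega)]
      rcases eq_or_lt_of_le ha with rfl | haj
      · simp [hpj]
      · have hpa : p a = false := hmin a le_rfl haj
        rw [List.find?_cons, hpa]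
        exact ih (a + 1) j (by omega) (by omega) hj hpj (fun i h1 h2 => hmin i (by omega) h2)

-- ===== VERDICT =====
theorem dec_string_spec : Claim_equal_dec_string := by
  intro text _hdom hpre
  unfold Spec_dec_string dec_string dec_string_alt
  by_cases h0 : '0' ∈ text.toList
  · -- '0' present: Pre_ gives all-digit plus a missing digit among '1'..'9'
    obtain ⟨hdall, hany⟩ := hpre h0
    have hd : ∀ c ∈ text.toList, c.isDigit := by simpa using hdall
    obtain ⟨m, hm, hmnot⟩ : ∃ c ∈ ['1','2','3','4','5','6','7','8','9'], c ∉ text.toList := by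
      simpa using hany
    set s := text.toList with hs
    -- existence of a terminating shift amount
    have hmdig : m.isDigit ∧ 1 ≤ cInt m ∧ cInt m < 10 := by
      fin_cases hm <;> refine ⟨by decide, by decide, by decide⟩
    have hex : ∃ j : Nat, '0' ∉ (fun t => t.map stepC)^[j] s := by
      refine ⟨(10 - cInt m).toNat, ?_⟩
      rw [zero_mem_iter s hd]
      rintro ⟨c, hc, he⟩
      have hb := cInt_bounds c (hd c hc)
      have : cInt c = cInt m := by omega
      have : c = m := by
        rw [← dChar_cInt c (hd c hc), ← dChar_cInt m hmdig.1, this]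
      exact hmnot (this ▸ hc)
    classical
    set jmin := Nat.find hex with hjmin
    have hQ : '0' ∉ (fun t => t.map stepC)^[jmin] s := Nat.find_spec hex
    have hmin : ∀ i < jmin, '0' ∈ (fun t => t.map stepC)^[i] s :=
      fun i hi => not_not.mp (Nat.find_min hex hi)
    have hle : jmin ≤ (10 - cInt m).toNat := Nat.find_min' hex (by
      rw [zero_mem_iter s hd]
      rintro ⟨c, hc, he⟩
      have hb := cInt_bounds c (hd c hc)
      have : cInt c = cInt m := by omega
      have : c = m := by
        rw [← dChar_cInt c (hd c hc), ← dChar_cInt m hmdig.1, this]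
      exact hmnot (this ▸ hc))
    have hj9 : jmin ≤ 9 := by omega
    have hj1 : 1 ≤ jmin := by
      rcases Nat.eq_zero_or_pos jmin with hz | h1
      · exfalso; apply hQ; rw [hz]; simpa using h0
      · exact h1
    -- A's loop result
    have hA := decLoopA_eq 10 jmin s 0 (by omega) hQ hmin
    -- B's predicate coincides with termination of A's shifted list
    have hpred : ∀ j : Int, 0 ≤ j → j < 10 →
        ((!(PySem.Set.contains (PySem.Set.ofList (s.map (fun c => (10 - cInt c) % 10))) j)) = true
          ↔ '0' ∉ (fun t => t.map stepC)^[j.toNat] s) := by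
      intro j hj0 hj10
      rw [zero_mem_iter s hd]
      simp only [Bool.not_eq_eq_eq_not, Bool.not_true, ← Bool.not_eq_true,
        PySem.Set.contains_iff, PySem.Set.mem_ofList, List.mem_map]
      constructor
      · rintro hnm ⟨c, hc, he⟩
        have hb := cInt_bounds c (hd c hc)
        exact hnm ⟨c, hc, by omega⟩
      · rintro hno ⟨c, hc, he⟩
        have hb := cInt_bounds c (hd c hc)
        exact hno ⟨c, hc, by omega⟩
    -- B's find? returns jmin
    have hfind : (PySem.List.pyRange 0 10 1).find?
        (fun i => !(PySem.Set.contains (PySem.Set.ofList (s.map (fun c => (10 - cInt c) % 10))) i))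
        = some (jmin : Int) := by
      apply find_least_range _ _ 10 0 (jmin : Int) (by decide) (by omega) (by omega)
      · rw [hpred (jmin : Int) (by omega) (by omega)]
        simpa using hQ
      · intro i hi0 hij
        have : i = (i.toNat : Int) := by omega
        rw [this] at hij ⊢
        have hlt : i.toNat < jmin := by omega
        rw [← Bool.not_eq_true, hpred (i.toNat : Int) (by omega) (by omega)]
        simp only [Int.toNat_natCast]
        exact not_not_intro (hmin i.toNat hlt)
    simp only [h0, if_pos, hA, hfind, Option.getD_some]
    have hiter : (fun t => t.map stepC)^[jmin] s
        = s.map (fun c => dChar ((cInt c + (jmin : Int)) % 10)) := iter_map s hd jmin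
    have hinc : (0 + (jmin : Int)) = (jmin : Int) := by omega
    rw [hiter, hinc]
    simp only [List.length_map]
    rw [if_neg (by omega : ¬ ((jmin : Int) = 0))]
  · -- no '0': A's loop exits immediately; both sides report 9 and leave the string unchanged
    have hA0 : decLoopA 10 text.toList 0 = (text.toList, 0) := by
      rw [show (10 : Nat) = 9 + 1 from rfl]
      simp [decLoopA, h0]
    simp only [hA0, if_neg h0]
    simp only [if_true]
    have : PySem.Int.toStr 9 = "9" := by decide
    rw [this]
    congr 1
    exact String.ofList_toList
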